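-- pv_equiv track=rewrite | github.com/orenlab/codeclone | codeclone/report.py | build_block_groups
-- ===== SOURCE A (Python) =====
-- from typing import Any
--
-- GroupItem = dict[str, Any]
--
-- GroupMap = dict[str, list[GroupItem]]
--
-- def build_block_groups(blocks: list[GroupItem], min_functions: int = 2) -> GroupMap:
--     groups: GroupMap = {}
--     for b in blocks:
--         groups.setdefault(b["block_hash"], []).append(b)
--
--     filtered: GroupMap = {}
--     for h, items in groups.items():
--         functions = {i["qualname"] for i in items}
--         if len(functions) >= min_functions:
--             filtered[h] = items
--
--     return filtered
-- ===== SOURCE B (Python) =====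
-- def build_block_groups(blocks, min_functions=2):
--     # Partition-based: repeatedly peel off ALL blocks sharing the first remaining
--     # block's hash, decide that group immediately, and continue on the shrunken
--     # list -- no intermediate grouping dict is ever built.
--     filtered = {}
--     rest = blocks
--     while rest:
--         h = rest[0]["block_hash"]
--         same = [b for b in rest if b["block_hash"] == h]
--         rest = [b for b in rest if b["block_hash"] != h]
--         if len({b["qualname"] for b in same}) >= min_functions:
--             filtered[h] = same
--     return filtered
-- ===== Notes on version B (the rewrite author's own statement) =====
-- stated objective: alternative
-- what changed: A builds a hash->list grouping dict in one pass and then filters that dict with per-group set comprehensions; B uses no grouping dict at all: it repeatedly partitions the remaining list around the first block's hash, peeling off one whole group per round and deciding it immediately, so groups are extracted by list partitioning on a shrinking list instead of dict accumulation.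
import Mathlib
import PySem

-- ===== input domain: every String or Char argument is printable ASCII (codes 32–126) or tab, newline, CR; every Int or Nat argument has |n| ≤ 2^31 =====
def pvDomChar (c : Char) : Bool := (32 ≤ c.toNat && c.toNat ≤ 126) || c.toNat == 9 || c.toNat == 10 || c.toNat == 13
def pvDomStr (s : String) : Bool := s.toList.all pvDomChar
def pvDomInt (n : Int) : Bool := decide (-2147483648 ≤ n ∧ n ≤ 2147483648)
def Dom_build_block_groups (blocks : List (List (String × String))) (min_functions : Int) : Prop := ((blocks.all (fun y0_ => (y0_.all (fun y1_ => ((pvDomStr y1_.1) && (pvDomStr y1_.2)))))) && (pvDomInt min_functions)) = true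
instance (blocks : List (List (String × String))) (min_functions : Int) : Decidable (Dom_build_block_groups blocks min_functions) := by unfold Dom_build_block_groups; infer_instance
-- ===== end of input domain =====

-- B replaces A's group-then-filter dict passes by repeated list partitioning:
-- it peels off one whole hash-group per round from a shrinking list and decides
-- it immediately (objective: alternative algorithm, no grouping dict).


-- ===== PORT A =====
-- b[k] on the association-list dict b; exact when the key is present (guaranteed by Pre_)
def bget (b : List (String × String)) (k : String) : String :=
  (PySem.Dict.mk b).getD k ""

def build_block_groups (blocks : List (List (String × String))) (min_functions : Int) : List (String × List (List (String × String))) :=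
  -- groups.setdefault(b["block_hash"], []).append(b)
  let groups : PySem.Dict String (List (List (String × String))) :=
    blocks.foldl (fun g b => g.modify (bget b "block_hash") [] (fun xs => xs ++ [b])) PySem.Dict.empty
  -- for h, items in groups.items(): keep when len({i["qualname"] for i in items}) >= min_functions
  let filtered : PySem.Dict String (List (List (String × String))) :=
    groups.items.foldl (fun f hi =>
      let functions : PySem.Set String := PySem.Set.ofList (hi.2.map (fun i => bget i "qualname"))
      if min_functions ≤ PySem.Set.len functions then f.insert hi.1 hi.2 else f) PySem.Dict.empty
  filtered.items

-- ===== PORT B =====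
-- the while loop of Source B: peel off the first block's whole hash-group, decide it, recurse on the rest
def bbgAltLoop (min_functions : Int) (rest : List (List (String × String)))
    (filtered : PySem.Dict String (List (List (String × String)))) :
    PySem.Dict String (List (List (String × String))) :=
  match rest with
  | [] => filtered
  | b :: t =>
    let h := bget b "block_hash"
    let same := (b :: t).filter (fun x => bget x "block_hash" == h)
    let rest' := (b :: t).filter (fun x => !(bget x "block_hash" == h))
    let filtered' :=
      if min_functions ≤ PySem.Set.len (PySem.Set.ofList (same.map (fun x => bget x "qualname")))
      then filtered.insert h same else filtered
    bbgAltLoop min_functions rest' filtered'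
termination_by rest.length
decreasing_by
  simp only [List.filter_cons, beq_self_eq_true, Bool.not_true, Bool.false_eq_true,
    if_false, List.length_cons]
  exact Nat.lt_succ_of_le (List.length_filter_le _ _)

def build_block_groups_alt (blocks : List (List (String × String))) (min_functions : Int) : List (String × List (List (String × String))) :=
  (bbgAltLoop min_functions blocks PySem.Dict.empty).items

-- ===== PRECONDITION & SPEC =====
-- Pre_ excludes blocks missing a "block_hash" or "qualname" key, on which Python A raises KeyError.
def Pre_build_block_groups (blocks : List (List (String × String))) (min_functions : Int) : Prop :=
  ∀ b ∈ blocks, ((b.map Prod.fst).contains "block_hash" && (b.map Prod.fst).contains "qualname") = true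
instance (blocks : List (List (String × String))) (min_functions : Int) : Decidable (Pre_build_block_groups blocks min_functions) := by unfold Pre_build_block_groups; infer_instance

def pvWitness_build_block_groups : (List (List (String × String))) × Int :=
  ([[("block_hash", "h1"), ("qualname", "f")], [("block_hash", "h1"), ("qualname", "g")]], 2)

def Spec_build_block_groups (blocks : List (List (String × String))) (min_functions : Int) (out : List (String × List (List (String × String)))) : Prop := out = build_block_groups_alt blocks min_functions
instance (blocks : List (List (String × String))) (min_functions : Int) (out : List (String × List (List (String × String)))) : Decidable (Spec_build_block_groups blocks min_functions out) := by unfold Spec_build_block_groups; infer_instance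

-- ===== CLAIM (what is proved, stated in full; the proofs are below) =====
def Claim_equal_build_block_groups : Prop := ∀ (blocks : List (List (String × String))) (min_functions : Int), Dom_build_block_groups blocks min_functions → Pre_build_block_groups blocks min_functions → Spec_build_block_groups blocks min_functions (build_block_groups blocks min_functions)

-- ===== LEMMAS AND PROOFS =====

-- abbreviations used only by the proofs
def hashOf (b : List (String × String)) : String := bget b "block_hash"
def qualOf (b : List (String × String)) : String := bget b "qualname"
def grp (blocks : List (List (String × String))) (h : String) : List (List (String × String)) :=
  blocks.filter (fun b => hashOf b == h)
def qok (blocks : List (List (String × String))) (m : Int) (h : String) : Bool :=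
  decide (m ≤ PySem.Set.len (PySem.Set.ofList ((grp blocks h).map qualOf)))

-- getD after a modify-fold keyed by an arbitrary key function
theorem getD_foldl_modify_gen {β ν : Type} (l : List β) (k : β → String) (d0 : ν)
    (f : β → ν → ν) (d : PySem.Dict String ν) (c : String) :
    (l.foldl (fun d b => d.modify (k b) d0 (f b)) d).getD c d0
      = (l.filter (fun b => k b == c)).foldl (fun v b => f b v) (d.getD c d0) := by
  induction l generalizing d with
  | nil => rfl
  | cons a l ih =>
    simp only [List.foldl_cons, List.filter_cons]
    rw [ih]
    by_cases hc : (k a == c) = true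
    · have hce : c = k a := (beq_iff_eq.mp hc).symm
      rw [if_pos hc, List.foldl_cons, PySem.Dict.getD_modify, if_pos hce, hce]
    · have hce : c ≠ k a := fun h => by simp [h] at hc
      rw [if_neg hc, PySem.Dict.getD_modify, if_neg hce]

-- items of an if-guarded insert-fold over fresh distinct keys
theorem items_foldl_if_insert {ν : Type} (l : List String) (P : String → Bool) (v : String → ν)
    (d : PySem.Dict String ν) (hfresh : ∀ a ∈ l, d.contains a = false) (hnd : l.Nodup) :
    (l.foldl (fun d h => if P h then d.insert h (v h) else d) d).items
      = d.items ++ (l.filter P).map (fun h => (h, v h)) := by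
  induction l generalizing d with
  | nil => simp
  | cons a l ih =>
    simp only [List.foldl_cons, List.filter_cons]
    have hna : a ∉ l := (List.nodup_cons.mp hnd).1
    have hnd' : l.Nodup := (List.nodup_cons.mp hnd).2
    by_cases hp : P a = true
    · rw [if_pos hp]
      rw [ih _ (fun b hb => by
        rw [PySem.Dict.contains_insert]
        have hne : b ≠ a := fun h => hna (h ▸ hb)
        simp [hne, hfresh b (List.mem_cons_of_mem _ hb)]) hnd']
      rw [PySem.Dict.items_insert_of_not_contains _ _ (hfresh a (List.mem_cons_self)), if_pos hp]
      simp
    · rw [if_neg hp, if_neg hp]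
      rw [ih _ (fun b hb => hfresh b (List.mem_cons_of_mem _ hb)) hnd']

-- filtering commutes with the Set.add fold (hence with Set.ofList)
theorem filter_foldl_add (m : List String) (p : String → Bool) (s : PySem.Set String) :
    (List.foldl PySem.Set.add s m).filter p = List.foldl PySem.Set.add (s.filter p) (m.filter p) := by
  induction m generalizing s with
  | nil => rfl
  | cons x m ih =>
    simp only [List.foldl_cons, List.filter_cons]
    by_cases hp : p x = true
    · rw [if_pos hp, List.foldl_cons, ih]
      congr 1
      simp only [PySem.Set.add, PySem.Set.contains]
      by_cases hx : x ∈ s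
      · simp [hx, hp]
      · simp [hx, hp, List.filter_append]
    · rw [if_neg hp, ih]
      congr 1
      simp only [PySem.Set.add, PySem.Set.contains]
      by_cases hx : x ∈ s
      · simp [hx]
      · simp [hx, List.filter_append, hp]

theorem ofList_filter (m : List String) (p : String → Bool) :
    (PySem.Set.ofList m).filter p = PySem.Set.ofList (m.filter p) := by
  rw [PySem.Set.ofList_eq_foldl, PySem.Set.ofList_eq_foldl, filter_foldl_add]
  rfl

-- first-occurrence dedup peels off the head's whole equivalence class
theorem ofList_cons_filter (x : String) (xs : List String) :
    PySem.Set.ofList (x :: xs) = x :: PySem.Set.ofList (xs.filter (fun y => !(y == x))) := by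
  rw [PySem.Set.ofList_cons]
  congr 1
  rw [← ofList_filter]
  have hnd : (PySem.Set.ofList xs).Nodup := PySem.Set.nodup_ofList xs
  simp [PySem.Set.discard]

-- the grouping fold, read off at one key
theorem getD_group_fold (blocks : List (List (String × String))) (c : String) :
    (blocks.foldl (fun g b => g.modify (hashOf b) [] (fun xs => xs ++ [b])) PySem.Dict.empty).getD c []
      = grp blocks c := by
  rw [getD_foldl_modify_gen blocks hashOf [] (fun b xs => xs ++ [b]) PySem.Dict.empty c]
  rw [PySem.Dict.getD_empty]
  show (grp blocks c).foldl (fun v b => v ++ [b]) [] = grp blocks c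
  induction (grp blocks c) using List.reverseRecOn with
  | nil => rfl
  | append_singleton l a ih => simp [ih]

-- keys of the grouping fold from empty
theorem keys_group_fold {ν : Type} (blocks : List (List (String × String))) (d0 : ν)
    (f : PySem.Dict String ν → List (String × String) → ν → ν) :
    (blocks.foldl (fun d b => d.modify (hashOf b) d0 (f d b)) PySem.Dict.empty).keys
      = PySem.Set.ofList (blocks.map hashOf) := by
  rw [PySem.Dict.keys_foldl_modify_key blocks hashOf d0 f PySem.Dict.empty]
  simp [PySem.Set.update, PySem.Set.ofList_eq_foldl, PySem.Dict.keys_empty]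

-- ===== B-side invariant =====

-- one partition round keeps the groups and the qualname sets of the survivors
theorem grp_filter_ne (rest : List (List (String × String))) (h0 c : String) (hne : c ≠ h0) :
    grp (rest.filter (fun x => !(hashOf x == h0))) c = grp rest c := by
  unfold grp
  rw [List.filter_filter]
  apply List.filter_congr
  intro b _
  by_cases hb : (hashOf b == c) = true
  · have : hashOf b = c := beq_iff_eq.mp hb
    simp [this, hne]
  · simp [hb]

theorem map_hash_filter (rest : List (List (String × String))) (h0 : String) :
    (rest.filter (fun x => !(hashOf x == h0))).map hashOf
      = (rest.map hashOf).filter (fun y => !(y == h0)) := by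
  rw [List.filter_map]
  rfl

theorem bbgAltLoop_items (m : Int) (n : Nat) :
    ∀ (rest : List (List (String × String))), rest.length ≤ n →
    ∀ (d : PySem.Dict String (List (List (String × String)))),
      (∀ h ∈ rest.map hashOf, d.contains h = false) →
    (bbgAltLoop m rest d).items
      = d.items ++ ((PySem.Set.ofList (rest.map hashOf)).filter (qok rest m)).map
          (fun h => (h, grp rest h)) := by
  induction n with
  | zero =>
    intro rest hlen d _
    have : rest = [] := List.eq_nil_of_length_eq_zero (Nat.le_zero.mp hlen)
    subst this
    simp [bbgAltLoop, PySem.Set.ofList_nil]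
  | succ n ih =>
    intro rest hlen d hfresh
    match rest with
    | [] => simp [bbgAltLoop, PySem.Set.ofList_nil]
    | b :: t =>
      rw [bbgAltLoop]
      set h0 := bget b "block_hash" with hh0
      have hh0' : hashOf b = h0 := rfl
      set same := (b :: t).filter (fun x => bget x "block_hash" == h0) with hsame
      set rest' := (b :: t).filter (fun x => !(bget x "block_hash" == h0)) with hrest'
      have hsame_grp : same = grp (b :: t) h0 := rfl
      have hrest'_eq : rest' = (b :: t).filter (fun x => !(hashOf x == h0)) := rfl
      -- length bound for the recursive call
      have hlen' : rest'.length ≤ n := by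
        have : rest' = t.filter (fun x => !(bget x "block_hash" == h0)) := by
          rw [hrest', List.filter_cons]
          simp [hh0]
        rw [this]
        exact Nat.le_trans (List.length_filter_le _ _) (Nat.le_of_succ_le_succ hlen)
      -- the head's hash is gone from rest'
      have hmem' : ∀ h ∈ rest'.map hashOf, h ≠ h0 ∧ h ∈ (b :: t).map hashOf := by
        intro h hh
        rw [hrest'_eq, map_hash_filter] at hh
        have := List.mem_filter.mp hh
        refine ⟨fun he => by simp [he] at this, this.1⟩
      -- dedup peel
      have hpeel : PySem.Set.ofList ((b :: t).map hashOf)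
          = h0 :: PySem.Set.ofList (rest'.map hashOf) := by
        rw [hrest'_eq, map_hash_filter, List.map_cons, hh0', ofList_cons_filter,
          List.filter_cons]
        simp
      -- qok and grp survive the round
      have hcongr : ((PySem.Set.ofList (rest'.map hashOf)).filter (qok rest' m)).map
            (fun h => (h, grp rest' h))
          = ((PySem.Set.ofList (rest'.map hashOf)).filter (qok (b :: t) m)).map
            (fun h => (h, grp (b :: t) h)) := by
        have hq : ∀ h ∈ PySem.Set.ofList (rest'.map hashOf), qok rest' m h = qok (b :: t) m h := by
          intro h hh
          have hne := (hmem' h ((PySem.Set.mem_ofList _ _).mp hh)).1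
          unfold qok
          rw [hrest'_eq, grp_filter_ne _ _ _ hne]
        rw [List.filter_congr hq]
        apply List.map_congr_left
        intro h hh
        have hne := (hmem' h ((PySem.Set.mem_ofList _ _).mp (List.mem_filter.mp hh).1)).1
        rw [hrest'_eq, grp_filter_ne _ _ _ hne]
      by_cases hc : m ≤ PySem.Set.len (PySem.Set.ofList (same.map (fun x => bget x "qualname")))
      · rw [if_pos hc]
        have hfresh' : ∀ h ∈ rest'.map hashOf, (d.insert h0 same).contains h = false := by
          intro h hh
          rw [PySem.Dict.contains_insert]
          have ⟨hne, hmem⟩ := hmem' h hh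
          simp [hne, hfresh h hmem]
        rw [ih rest' hlen' _ hfresh']
        rw [PySem.Dict.items_insert_of_not_contains _ _
          (hfresh h0 (by simp [List.map_cons, hh0']))]
        rw [hcongr, hpeel]
        have hq0 : qok (b :: t) m h0 = true := by
          unfold qok
          rw [← hsame_grp]
          exact decide_eq_true hc
        rw [List.filter_cons, hq0]
        simp [hsame_grp]
      · rw [if_neg hc]
        have hfresh' : ∀ h ∈ rest'.map hashOf, d.contains h = false := by
          intro h hh
          exact hfresh h (hmem' h hh).2
        rw [ih rest' hlen' _ hfresh']
        rw [hcongr, hpeel]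
        have hq0 : qok (b :: t) m h0 = false := by
          unfold qok
          rw [← hsame_grp]
          exact decide_eq_false hc
        rw [List.filter_cons, hq0]
        simp

-- ===== VERDICT (by name: the statement is the Claim_ definition above) =====

theorem build_block_groups_spec : Claim_equal_build_block_groups := by
  intro blocks m _ _
  unfold Spec_build_block_groups build_block_groups build_block_groups_alt
  -- ===== A side =====
  set groups := blocks.foldl (fun g b => g.modify (bget b "block_hash") [] (fun xs => xs ++ [b])) PySem.Dict.empty with hgroups
  have hkeysnd : groups.keys.Nodup := by
    rw [hgroups]
    exact PySem.Dict.nodup_keys_foldl_modify_key blocks (fun b => bget b "block_hash") []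
      (fun _ b xs => xs ++ [b]) PySem.Dict.empty (by simp [PySem.Dict.keys_empty])
  have hkeys : groups.keys = PySem.Set.ofList (blocks.map hashOf) := by
    rw [hgroups]; exact keys_group_fold blocks [] (fun _ b xs => xs ++ [b])
  have hgetD : ∀ c, groups.getD c [] = grp blocks c := by
    intro c; rw [hgroups]; exact getD_group_fold blocks c
  have hitems : groups.items = groups.keys.map (fun h => (h, grp blocks h)) := by
    rw [PySem.Dict.items_eq_map_keys groups hkeysnd []]
    exact List.map_congr_left (fun h _ => by rw [hgetD h])
  have hAside :
      (groups.items.foldl (fun f hi =>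
        if m ≤ PySem.Set.len (PySem.Set.ofList (hi.2.map (fun i => bget i "qualname")))
        then f.insert hi.1 hi.2 else f) PySem.Dict.empty).items
      = (groups.keys.filter (qok blocks m)).map (fun h => (h, grp blocks h)) := by
    rw [hitems, List.foldl_map]
    have heq : (fun (d : PySem.Dict String (List (List (String × String)))) (h : String) =>
        if m ≤ PySem.Set.len (PySem.Set.ofList ((grp blocks h).map (fun i => bget i "qualname")))
        then d.insert h (grp blocks h) else d)
      = (fun d h => if qok blocks m h then d.insert h (grp blocks h) else d) := by
      funext d h
      by_cases hqq : qok blocks m h = true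
      · have hm : m ≤ (PySem.Set.ofList ((grp blocks h).map (fun i => bget i "qualname"))).len := by
          simpa [qok, qualOf] using hqq
        rw [if_pos hm, if_pos hqq]
      · have hm : ¬ m ≤ (PySem.Set.ofList ((grp blocks h).map (fun i => bget i "qualname"))).len := by
          simpa [qok, qualOf] using hqq
        rw [if_neg hm, if_neg hqq]
    rw [heq]
    rw [items_foldl_if_insert groups.keys (qok blocks m) (grp blocks) PySem.Dict.empty
      (fun a _ => by simp [PySem.Dict.contains_empty]) hkeysnd]
    simp [PySem.Dict.empty]
  -- ===== B side =====
  have hBside : (bbgAltLoop m blocks PySem.Dict.empty).items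
      = ((PySem.Set.ofList (blocks.map hashOf)).filter (qok blocks m)).map
          (fun h => (h, grp blocks h)) := by
    rw [bbgAltLoop_items m blocks.length blocks (Nat.le_refl _) PySem.Dict.empty
      (fun h _ => by simp [PySem.Dict.contains_empty])]
    simp [PySem.Dict.empty]
  -- ===== combine =====
  simp only []
  rw [hAside, hBside, hkeys]
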